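-- pv_equiv track=rewrite | github.com/pangzike/Robot | my_controller/rrt.py | inter_smooth
-- ===== SOURCE A (Python) =====
-- def inter_smooth(path):
--     def inter(x):
--         res = []
--         for i in range (len(x)):
--             if i % 2 == 1:
--                 if i + 1 < len(x):
--                     res.append ((x[i-1]+x[i+1])//2 )
--                 else:
--                     res.append(x[i])
--             else :
--                 res.append(x[i])
--         return res
--
--     x = []
--     y = []
--     for i in path:
--         x.append(i[0])
--         y.append(i[1])
--     x = inter(x)
--     y = inter(y)
--     return   [i for i in zip(x,y)]
-- ===== SOURCE B (Python) =====
-- def inter_smooth(path):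
--     res = [(p[0], p[1]) for p in path]
--     for i in range(1, len(path), 2):
--         if i + 1 < len(path):
--             res[i] = ((path[i - 1][0] + path[i + 1][0]) // 2,
--                       (path[i - 1][1] + path[i + 1][1]) // 2)
--     return res
-- ===== Notes on version B (the rewrite author's own statement) =====
-- stated objective: simpler
-- what changed: B builds the output tuple list once and overwrites only the odd positions in a single stepped pass over range(1, len, 2), instead of A's three phases: splitting into separate x/y coordinate lists, running the inter helper with a parity test over every index of each, and re-zipping.
import Mathlib
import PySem

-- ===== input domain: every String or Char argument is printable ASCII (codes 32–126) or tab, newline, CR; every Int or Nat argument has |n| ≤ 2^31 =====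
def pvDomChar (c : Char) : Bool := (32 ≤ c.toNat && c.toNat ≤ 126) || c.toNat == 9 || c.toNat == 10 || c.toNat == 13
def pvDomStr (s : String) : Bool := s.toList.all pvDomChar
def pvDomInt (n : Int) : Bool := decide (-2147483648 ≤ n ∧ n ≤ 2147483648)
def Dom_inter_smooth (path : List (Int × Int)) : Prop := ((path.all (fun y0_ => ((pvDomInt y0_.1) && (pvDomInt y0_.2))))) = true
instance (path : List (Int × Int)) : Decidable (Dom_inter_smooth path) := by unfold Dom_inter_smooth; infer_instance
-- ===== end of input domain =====

-- B replaces A's split-into-x/y-lists + per-coordinate 'inter' pass + re-zip by one in-place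
-- stepped pass over the odd indices of a single tuple list (objective: simpler).

-- ===== PORT A =====
-- the nested helper 'inter'
def pvInterA (x : List Int) : List Int :=
  (PySem.List.pyRange 0 x.length 1).foldl
    (fun res i =>
      if PySem.Int.mod i 2 == 1 then
        if i + 1 < (x.length : Int) then
          res ++ [PySem.Int.floordiv (PySem.List.pyGetD x (i - 1) 0 + PySem.List.pyGetD x (i + 1) 0) 2]
        else
          res ++ [PySem.List.pyGetD x i 0]
      else
        res ++ [PySem.List.pyGetD x i 0]) []

def inter_smooth (path : List (Int × Int)) : List (Int × Int) :=
  let xy := path.foldl (fun (p : List Int × List Int) i => (p.1 ++ [i.1], p.2 ++ [i.2])) ([], [])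
  (pvInterA xy.1).zip (pvInterA xy.2)

-- ===== PORT B =====
def inter_smooth_alt (path : List (Int × Int)) : List (Int × Int) :=
  let res := path.map (fun p => (p.1, p.2))
  (PySem.List.pyRange 1 path.length 2).foldl
    (fun r i =>
      if i + 1 < (path.length : Int) then
        r.set i.toNat
          (PySem.Int.floordiv ((PySem.List.pyGetD path (i - 1) (0, 0)).1 + (PySem.List.pyGetD path (i + 1) (0, 0)).1) 2,
           PySem.Int.floordiv ((PySem.List.pyGetD path (i - 1) (0, 0)).2 + (PySem.List.pyGetD path (i + 1) (0, 0)).2) 2)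
      else r) res

-- ===== PRECONDITION & SPEC =====
def Spec_inter_smooth (path : List (Int × Int)) (out : List (Int × Int)) : Prop := out = inter_smooth_alt path
instance (path : List (Int × Int)) (out : List (Int × Int)) : Decidable (Spec_inter_smooth path out) := by unfold Spec_inter_smooth; infer_instance

-- ===== CLAIM (what is proved, stated in full; the proofs are below) =====
def Claim_equal_inter_smooth : Prop := ∀ (path : List (Int × Int)), Dom_inter_smooth path → Spec_inter_smooth path (inter_smooth path)

-- ===== LEMMAS AND PROOFS =====

-- the value A's 'inter' produces at index j of a list x
def pvAVal (x : List Int) (j : Nat) : Int :=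
  if j % 2 = 1 ∧ j + 1 < x.length then
    PySem.Int.floordiv (PySem.List.pyGetD x ((j : Int) - 1) 0 + PySem.List.pyGetD x ((j : Int) + 1) 0) 2
  else
    PySem.List.pyGetD x (j : Int) 0

theorem pvFoldlSplit (path : List (Int × Int)) :
    ∀ (a b : List Int),
      path.foldl (fun (p : List Int × List Int) i => (p.1 ++ [i.1], p.2 ++ [i.2])) (a, b)
        = (a ++ path.map Prod.fst, b ++ path.map Prod.snd) := by
  induction path with
  | nil => intro a b; simp
  | cons hd tl ih =>
      intro a b
      simp only [List.foldl_cons, List.map_cons, ih]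
      simp

theorem pvFlatMapSingleton {α β : Type} (g : α → β) (l : List α) :
    l.flatMap (fun k => [g k]) = l.map g := by
  induction l with
  | nil => rfl
  | cons hd tl ih => simp [ih]

theorem pvInterA_eq (x : List Int) :
    pvInterA x = (List.range x.length).map (pvAVal x) := by
  unfold pvInterA
  rw [PySem.List.pyRange_zero_nat, List.foldl_map]
  rw [PySem.List.foldl_congr_mem (List.range x.length) _ (fun res k => res ++ [pvAVal x k]) []
      (by
        intro res k hk
        have hk' : k < x.length := List.mem_range.mp hk
        have hmod : (PySem.Int.mod (k : Int) 2 == 1) = decide (k % 2 = 1) := by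
          rw [PySem.Int.mod_eq_emod_of_pos (by norm_num)]
          have h2 : ((k : Int) % 2) = ((k % 2 : Nat) : Int) := by push_cast; rfl
          rw [h2]
          by_cases h : k % 2 = 1 <;> simp [h] <;> omega
        have hlt : ((k : Int) + 1 < (x.length : Int)) ↔ (k + 1 < x.length) := by
          omega
        show (if PySem.Int.mod (k : Int) 2 == 1 then _ else _) = res ++ [pvAVal x k]
        rw [hmod]
        simp only [decide_eq_true_eq, pvAVal]
        simp only [hlt]
        split_ifs <;> first | rfl | tauto)]
  rw [PySem.List.foldl_append_eq_flatMap (fun k => [pvAVal x k]) (List.range x.length) []]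
  rw [pvFlatMapSingleton]
  rfl

-- final values of B's set-fold, queried with getElem?
theorem pvFoldlSet_getElem? {α : Type} (c : Int → Prop) [DecidablePred c] (f : Int → α) :
    ∀ (L : List Int) (l : List α),
      (∀ i ∈ L, 0 ≤ i ∧ i < (l.length : Int)) →
      ∀ (j : Nat),
        (L.foldl (fun r i => if c i then r.set i.toNat (f i) else r) l)[j]?
          = if (j : Int) ∈ L ∧ c j then some (f j) else l[j]? := by
  intro L
  induction L with
  | nil => intro l _ j; simp
  | cons i L' ih =>
      intro l hb j
      simp only [List.foldl_cons]
      have hlen : (if c i then l.set i.toNat (f i) else l).length = l.length := by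
        split <;> simp
      have hb' : ∀ i' ∈ L', 0 ≤ i' ∧ i' < (((if c i then l.set i.toNat (f i) else l).length : Nat) : Int) := by
        intro i' hi'
        rw [hlen]
        exact hb i' (List.mem_cons_of_mem _ hi')
      rw [ih _ hb' j]
      by_cases hmem : (j : Int) ∈ L' ∧ c j
      · rw [if_pos hmem, if_pos ⟨List.mem_cons_of_mem _ hmem.1, hmem.2⟩]
      · rw [if_neg hmem]
        by_cases hji : (j : Int) = i
        · subst hji
          by_cases hc : c (j : Int)
          · have hjl : j < l.length := by
              have := (hb _ List.mem_cons_self).2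
              omega
            rw [if_pos (⟨List.mem_cons_self, hc⟩ : (j : Int) ∈ (j : Int) :: L' ∧ c (j : Int))]
            rw [if_pos hc, show (j : Int).toNat = j from by omega]
            exact List.getElem?_set_self hjl
          · rw [if_neg hc, if_neg (fun h => hc h.2)]
        · have hcond : ¬ ((j : Int) ∈ i :: L' ∧ c j) := by
            intro h
            rcases h with ⟨hm, hc⟩
            rcases List.mem_cons.mp hm with h | h
            · exact hji h
            · exact hmem ⟨h, hc⟩
          rw [if_neg hcond]
          by_cases hc : c i
          · rw [if_pos hc]
            apply List.getElem?_set_ne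
            intro h
            apply hji
            have h0 : 0 ≤ i := (hb i List.mem_cons_self).1
            omega
          · rw [if_neg hc]

theorem pvGetFst (path : List (Int × Int)) (i : Int) :
    PySem.List.pyGetD (path.map Prod.fst) i 0 = (PySem.List.pyGetD path i (0, 0)).1 :=
  PySem.List.pyGetD_map Prod.fst path i (0, 0)

theorem pvGetSnd (path : List (Int × Int)) (i : Int) :
    PySem.List.pyGetD (path.map Prod.snd) i 0 = (PySem.List.pyGetD path i (0, 0)).2 :=
  PySem.List.pyGetD_map Prod.snd path i (0, 0)

-- ===== VERDICT (by name: the statement is the Claim_ definition above) =====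
theorem inter_smooth_spec : Claim_equal_inter_smooth := by
  intro path _
  unfold Spec_inter_smooth inter_smooth inter_smooth_alt
  simp only [pvFoldlSplit path [] []]
  simp only [List.nil_append, pvInterA_eq, List.length_map]
  rw [List.zip_map']
  have hres : path.map (fun p => (p.1, p.2)) = path := by
    simp
  rw [hres]
  apply List.ext_getElem?
  intro j
  rw [pvFoldlSet_getElem? (fun i => i + 1 < (path.length : Int))
        (fun i => (PySem.Int.floordiv ((PySem.List.pyGetD path (i - 1) (0, 0)).1 + (PySem.List.pyGetD path (i + 1) (0, 0)).1) 2,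
                   PySem.Int.floordiv ((PySem.List.pyGetD path (i - 1) (0, 0)).2 + (PySem.List.pyGetD path (i + 1) (0, 0)).2) 2))
        (PySem.List.pyRange 1 (path.length : Int) 2) path
        (by
          intro i hi
          have := (PySem.List.mem_pyRange_iff_of_pos (by norm_num : (0:Int) < 2) i).mp hi
          exact ⟨by omega, this.2.1⟩) j]
  by_cases hj : j < path.length
  · rw [List.getElem?_map]
    simp only [List.getElem?_range hj, Option.map_some]
    by_cases hodd : j % 2 = 1 ∧ j + 1 < path.length
    · have hmem : (j : Int) ∈ PySem.List.pyRange 1 (path.length : Int) 2 := by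
        rw [PySem.List.mem_pyRange_iff_of_pos (by norm_num : (0:Int) < 2)]
        refine ⟨by omega, by omega, ?_⟩
        obtain ⟨h1, _⟩ := hodd
        omega
      have hc : ((j : Int) + 1 < (path.length : Int)) := by omega
      rw [if_pos ⟨hmem, hc⟩]
      simp only [pvAVal, List.length_map]
      rw [if_pos hodd, if_pos hodd]
      rw [pvGetFst, pvGetFst, pvGetSnd, pvGetSnd]
    · have hcond : ¬ ((j : Int) ∈ PySem.List.pyRange 1 (path.length : Int) 2 ∧ (j : Int) + 1 < (path.length : Int)) := by
        rintro ⟨hm, hc⟩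
        rw [PySem.List.mem_pyRange_iff_of_pos (by norm_num : (0:Int) < 2)] at hm
        apply hodd
        obtain ⟨h1, _, h3⟩ := hm
        constructor
        · omega
        · omega
      rw [if_neg hcond]
      simp only [pvAVal, List.length_map]
      rw [if_neg hodd, if_neg hodd, pvGetFst, pvGetSnd]
      rw [PySem.List.pyGetD_eq_getElem path (0, 0) (by omega) (by exact_mod_cast hj)]
      rw [List.getElem?_eq_getElem hj]
      simp
  · have hcond : ¬ ((j : Int) ∈ PySem.List.pyRange 1 (path.length : Int) 2 ∧ (j : Int) + 1 < (path.length : Int)) := by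
      rintro ⟨hm, _⟩
      rw [PySem.List.mem_pyRange_iff_of_pos (by norm_num : (0:Int) < 2)] at hm
      omega
    rw [if_neg hcond]
    rw [List.getElem?_eq_none (by simpa using hj), List.getElem?_eq_none (by omega)]
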